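-- pv_equiv track=rewrite | github.com/nhatkhangcs/BARTpho-VietBana | pipeline/model_translate.py | norm_text
-- ===== SOURCE A (Python) =====
-- import string
--
-- def norm_text(line):
--     for n in string.digits:
--         line = line.replace(n, f" {n} ")
--     for p in string.punctuation + ",.\\/:;–…":
--         line = line.replace(p, f" {p} ")
--     while "  " in line:
--         line = line.replace("  ", " ")
--     line = line.strip()
--     return line
-- ===== SOURCE B (Python) =====
-- import string
--
-- def norm_text(line):
--     pad = set(string.digits + string.punctuation + ",.\\/:;–…")
--     expanded = []
--     for ch in line:
--         if ch in pad:
--             expanded.append(' ')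
--             expanded.append(ch)
--             expanded.append(' ')
--         else:
--             expanded.append(ch)
--     res = []
--     for ch in expanded:
--         if ch == ' ' and res and res[-1] == ' ':
--             continue
--         res.append(ch)
--     return ''.join(res).strip()
-- ===== Notes on version B (the rewrite author's own statement) =====
-- stated objective: alternative
-- what changed: Replaces A's ~42 per-pad-character full-string replace passes plus an iterated double-space-replace fixpoint loop with a single character-level expansion pass followed by a single run-collapsing pass; not faster in CPython since A's passes run in C.
import Mathlib
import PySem

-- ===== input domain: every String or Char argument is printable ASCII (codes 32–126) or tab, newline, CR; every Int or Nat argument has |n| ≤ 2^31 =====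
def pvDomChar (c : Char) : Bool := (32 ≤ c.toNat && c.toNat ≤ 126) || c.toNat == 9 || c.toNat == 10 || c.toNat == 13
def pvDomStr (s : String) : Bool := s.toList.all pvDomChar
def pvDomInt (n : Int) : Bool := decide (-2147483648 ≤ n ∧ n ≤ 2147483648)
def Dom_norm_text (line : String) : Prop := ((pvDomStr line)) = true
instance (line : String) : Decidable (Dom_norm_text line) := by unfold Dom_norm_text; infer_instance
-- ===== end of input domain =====

-- Alternative decomposition: B replaces A's ~42 per-character full-string replace
-- passes and the iterated double-space-replace loop by one expansion pass plus one
-- run-collapsing pass (same result, proved below; no speed claim).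

-- ===== PORT A =====
-- Python's line.replace("  ", " ") on a char list (used to state the termination
-- measure of the while loop; proved equal to PySem.Chars.replace below the claim).
def pvReplace2 : List Char → List Char
  | [] => []
  | [a] => [a]
  | a :: b :: t => if a = ' ' ∧ b = ' ' then ' ' :: pvReplace2 t else a :: pvReplace2 (b :: t)

theorem pv_go2 (fuel : Nat) : ∀ (l acc : List Char), l.length ≤ fuel →
    PySem.Chars.replace.go [' ', ' '] [' '] fuel l acc = acc.reverse ++ pvReplace2 l := by
  induction fuel with
  | zero =>
    intro l acc h
    rw [PySem.Chars.replace.go.eq_def]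
    cases l with
    | nil => simp [pvReplace2]
    | cons c t => simp at h
  | succ f ih =>
    intro l acc h
    rw [PySem.Chars.replace.go.eq_def]
    match l with
    | [] => simp [pvReplace2]
    | [a] =>
      have hpre : List.isPrefixOf [' ', ' '] [a] = false := by
        simp [List.isPrefixOf]
      simp only [hpre, Bool.false_eq_true, if_false]
      rw [ih [] (a :: acc) (by simp)]
      simp [pvReplace2]
    | a :: b :: t =>
      by_cases hab : a = ' ' ∧ b = ' '
      · obtain ⟨ha, hb⟩ := hab; subst ha; subst hb
        have hpre : List.isPrefixOf [' ', ' '] (' ' :: ' ' :: t) = true := by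
          simp [List.isPrefixOf]
        simp only [hpre, if_true]
        have hdrop : List.drop (List.length [' ', ' ']) (' ' :: ' ' :: t) = t := rfl
        rw [hdrop, ih t _ (by simp at h; omega)]
        simp [pvReplace2]
      · have hpre : List.isPrefixOf [' ', ' '] (a :: b :: t) = false := by
          simp [List.isPrefixOf]
          intro ha hb; exact absurd ⟨ha.symm, hb.symm⟩ hab
        simp only [hpre, Bool.false_eq_true, if_false]
        rw [ih (b :: t) _ (by simp at h ⊢; omega)]
        simp [pvReplace2, hab]

theorem pv_replace2_eq (l : List Char) :
    PySem.Chars.replace l [' ', ' '] [' '] = pvReplace2 l := by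
  rw [PySem.Chars.replace]
  simp [pv_go2 l.length l [] (le_refl _)]

theorem pv_replace2_length_le (l : List Char) : (pvReplace2 l).length ≤ l.length := by
  induction l using pvReplace2.induct with
  | case1 => simp [pvReplace2]
  | case2 a => simp [pvReplace2]
  | case3 a b t hab ih => simp [pvReplace2, hab]; omega
  | case4 a b t hab ih => simp only [pvReplace2, if_neg hab]; simp at ih ⊢; omega

theorem pv_replace2_length_lt (l : List Char) (h : [' ', ' '] <:+: l) :
    (pvReplace2 l).length < l.length := by
  induction l using pvReplace2.induct with
  | case1 => simp at h
  | case2 a =>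
    exfalso
    obtain ⟨u, v, huv⟩ := h
    have := congrArg List.length huv
    simp at this; omega
  | case3 a b t hab ih =>
    simp [pvReplace2, hab]
    have := pv_replace2_length_le t
    omega
  | case4 a b t hab ih =>
    simp only [pvReplace2, if_neg hab]
    have hbt : [' ', ' '] <:+: (b :: t) := by
      rcases (List.infix_cons_iff).1 h with hpre | hinf
      · exfalso
        rcases hpre with ⟨v, hv⟩
        cases hv
        exact hab ⟨rfl, rfl⟩
      · exact hinf
    have := ih hbt
    simp at this ⊢
    omega

theorem pv_loop_lt (s : String) (h : PySem.Str.isIn "  " s = true) :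
    (PySem.Str.replace s "  " " ").toList.length < s.toList.length := by
  have h2 : [' ', ' '] <:+: s.toList := by
    rw [PySem.Str.isIn] at h
    exact (PySem.Chars.isIn_iff_infix _ _).1 h
  rw [PySem.Str.toList_replace]
  show (PySem.Chars.replace s.toList [' ', ' '] [' ']).length < _
  rw [pv_replace2_eq]
  exact pv_replace2_length_lt _ h2

-- while "  " in line: line = line.replace("  ", " ")
def pvCollapseLoop (s : String) : String :=
  if h : PySem.Str.isIn "  " s = true then pvCollapseLoop (PySem.Str.replace s "  " " ") else s
termination_by s.toList.length
decreasing_by exact pv_loop_lt s h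

def norm_text (line : String) : String :=
  -- for n in string.digits: line = line.replace(n, f" {n} ")
  let l1 := ("0123456789".toList).foldl
    (fun s n => PySem.Str.replace s (String.ofList [n]) (String.ofList [' ', n, ' '])) line
  -- for p in string.punctuation + ",.\/:;–…": line = line.replace(p, f" {p} ")
  let l2 := ("!\"#$%&'()*+,-./:;<=>?@[\\]^_`{|}~".toList ++ ",.\\/:;–…".toList).foldl
    (fun s p => PySem.Str.replace s (String.ofList [p]) (String.ofList [' ', p, ' '])) l1
  -- while "  " in line … ; line.strip()
  PySem.Str.strip (pvCollapseLoop l2)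

-- ===== PORT B =====
-- pad = set(string.digits + string.punctuation + ",.\/:;–…")
def pvPadB : PySem.Set Char :=
  PySem.Set.ofList ("0123456789!\"#$%&'()*+,-./:;<=>?@[\\]^_`{|}~,.\\/:;–…".toList)

def norm_text_alt (line : String) : String :=
  -- first loop: build `expanded`
  let expanded := line.toList.foldl
    (fun acc ch => if ch ∈ pvPadB then acc ++ [' ', ch, ' '] else acc ++ [ch]) ([] : List Char)
  -- second loop: collapse space runs into `res`
  let res := expanded.foldl
    (fun r ch => if ch = ' ' ∧ r ≠ [] ∧ r.getLast? = some ' ' then r else r ++ [ch]) ([] : List Char)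
  -- ''.join(res).strip()
  PySem.Str.strip (String.ofList res)

-- ===== PRECONDITION & SPEC =====
def Spec_norm_text (line : String) (out : String) : Prop := out = norm_text_alt line
instance (line : String) (out : String) : Decidable (Spec_norm_text line out) := by unfold Spec_norm_text; infer_instance

-- ===== CLAIM (what is proved, stated in full; the proofs are below) =====
def Claim_equal_norm_text : Prop := ∀ (line : String), Dom_norm_text line → Spec_norm_text line (norm_text line)

-- ===== LEMMAS AND PROOFS =====

-- canonical form: every run of spaces collapsed to a single space
def pvCanon : List Char → List Char
  | [] => []
  | [a] => [a]
  | a :: b :: t => if a = ' ' ∧ b = ' ' then pvCanon (b :: t) else a :: pvCanon (b :: t)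

-- "  " in l, as a scan over adjacent pairs
def pvDD : List Char → Bool
  | a :: b :: t => (a = ' ' && b = ' ') || pvDD (b :: t)
  | _ => false

theorem pvDD_iff_infix (l : List Char) : pvDD l = true ↔ [' ', ' '] <:+: l := by
  induction l with
  | nil => simp [pvDD]
  | cons a t ih =>
    cases t with
    | nil =>
      simp [pvDD]
      rintro ⟨u, v, huv⟩
      have := congrArg List.length huv; simp at this; omega
    | cons b t' =>
      rw [List.infix_cons_iff]
      constructor
      · intro h
        have h' : (a = ' ' ∧ b = ' ') ∨ pvDD (b :: t') = true := by simpa [pvDD] using h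
        rcases h' with ⟨ha, hb⟩ | h2
        · left; subst ha; subst hb; exact ⟨t', rfl⟩
        · right; exact ih.1 h2
      · intro h
        rcases h with ⟨v, hv⟩ | hinf
        · cases hv; simp [pvDD]
        · simp [pvDD, ih.2 hinf]

theorem pvCanon_cons_head (c : Char) (t : List Char) : ∃ u, pvCanon (c :: t) = c :: u := by
  induction t generalizing c with
  | nil => exact ⟨[], rfl⟩
  | cons b t ih =>
    by_cases hcb : c = ' ' ∧ b = ' '
    · obtain ⟨hc, hb⟩ := hcb; subst hc; subst hb
      obtain ⟨u, hu⟩ := ih ' '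
      exact ⟨u, by simp [pvCanon, hu]⟩
    · obtain ⟨u, hu⟩ := ih b
      exact ⟨pvCanon (b :: t), by simp [pvCanon, hcb]⟩

theorem pvCanon_dd_false (l : List Char) : pvDD (pvCanon l) = false := by
  induction l using pvCanon.induct with
  | case1 => simp [pvCanon, pvDD]
  | case2 a => simp [pvCanon, pvDD]
  | case3 a b t hab ih => simp only [pvCanon, if_pos hab]; exact ih
  | case4 a b t hab ih =>
    simp only [pvCanon, if_neg hab]
    obtain ⟨u, hu⟩ : ∃ u, pvCanon (b :: t) = b :: u := pvCanon_cons_head b t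
    rw [hu] at ih ⊢
    simp [pvDD] at ih ⊢
    exact ⟨fun ha hb => absurd ⟨ha, hb⟩ hab, ih⟩

theorem pvCanon_of_dd_false (l : List Char) (h : pvDD l = false) : pvCanon l = l := by
  induction l using pvCanon.induct with
  | case1 => rfl
  | case2 a => rfl
  | case3 a b t hab ih => simp [pvDD, hab.1, hab.2] at h
  | case4 a b t hab ih =>
    simp only [pvCanon, if_neg hab]
    simp [pvDD] at h
    rw [ih h.2]

theorem pvCanon_idem (l : List Char) : pvCanon (pvCanon l) = pvCanon l :=
  pvCanon_of_dd_false _ (pvCanon_dd_false l)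

theorem pvCanon_cons (x : Char) (t : List Char) :
    pvCanon (x :: t) = pvCanon (x :: pvCanon t) := by
  cases t with
  | nil => rfl
  | cons y ys =>
    obtain ⟨u, hu⟩ : ∃ u, pvCanon (y :: ys) = y :: u := pvCanon_cons_head y ys
    rw [hu]
    by_cases hxy : x = ' ' ∧ y = ' '
    · simp only [pvCanon, if_pos hxy]
      rw [← hu, pvCanon_idem]
    · simp only [pvCanon, if_neg hxy]
      rw [← hu, pvCanon_idem]

theorem pvCanon_append_left (a b : List Char) :
    pvCanon (a ++ b) = pvCanon (pvCanon a ++ b) := by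
  induction a using pvCanon.induct with
  | case1 => rfl
  | case2 x => rfl
  | case3 x y t hxy ih =>
    obtain ⟨hx, hy⟩ := hxy; subst hx; subst hy
    show pvCanon (' ' :: ' ' :: (t ++ b)) = _
    rw [show pvCanon (' ' :: ' ' :: t) = pvCanon (' ' :: t) by simp [pvCanon]]
    rw [show pvCanon (' ' :: ' ' :: (t ++ b)) = pvCanon (' ' :: (t ++ b)) by simp [pvCanon]]
    exact ih
  | case4 x y t hxy ih =>
    show pvCanon (x :: y :: (t ++ b)) = _
    rw [show pvCanon (x :: y :: t) = x :: pvCanon (y :: t) by simp [pvCanon, hxy]]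
    rw [show pvCanon (x :: y :: (t ++ b)) = x :: pvCanon (y :: (t ++ b)) by simp [pvCanon, hxy]]
    obtain ⟨u, hu⟩ : ∃ u, pvCanon (y :: t) = y :: u := pvCanon_cons_head y t
    rw [hu]
    show x :: pvCanon ((y :: t) ++ b) = pvCanon (x :: y :: (u ++ b))
    rw [show pvCanon (x :: y :: (u ++ b)) = x :: pvCanon (y :: (u ++ b)) by simp [pvCanon, hxy]]
    rw [ih, hu]; simp

theorem pvCanon_append_right (a b : List Char) :
    pvCanon (a ++ b) = pvCanon (a ++ pvCanon b) := by
  induction a with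
  | nil => exact (pvCanon_idem b).symm
  | cons x as ih =>
    show pvCanon (x :: (as ++ b)) = pvCanon (x :: (as ++ pvCanon b))
    rw [pvCanon_cons x (as ++ b), ih, ← pvCanon_cons]

theorem pvCanon_flatMap_congr (f g : Char → List Char) (s : List Char)
    (h : ∀ x, pvCanon (f x) = pvCanon (g x)) :
    pvCanon (s.flatMap f) = pvCanon (s.flatMap g) := by
  induction s with
  | nil => rfl
  | cons x xs ih =>
    simp only [List.flatMap_cons]
    rw [pvCanon_append_right _ (xs.flatMap f), ih, ← pvCanon_append_right,
        pvCanon_append_left (f x), h x, ← pvCanon_append_left]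

theorem pvCanon_cons_of_ne (c : Char) (cs : List Char) (hc : c ≠ ' ') :
    pvCanon (c :: cs) = c :: pvCanon cs := by
  cases cs with
  | nil => rfl
  | cons d ds => simp only [pvCanon]; rw [if_neg (fun h => hc h.1)]

-- single-character Python replace is a flatMap
theorem pv_go1 (c : Char) (r : List Char) (fuel : Nat) : ∀ (l acc : List Char), l.length ≤ fuel →
    PySem.Chars.replace.go [c] r fuel l acc
      = acc.reverse ++ l.flatMap (fun x => if x = c then r else [x]) := by
  induction fuel with
  | zero =>
    intro l acc h
    rw [PySem.Chars.replace.go.eq_def]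
    cases l with
    | nil => simp
    | cons a t => simp at h
  | succ f ih =>
    intro l acc h
    rw [PySem.Chars.replace.go.eq_def]
    match l with
    | [] => simp
    | a :: t =>
      by_cases hac : a = c
      · subst hac
        have hpre : List.isPrefixOf [a] (a :: t) = true := by simp [List.isPrefixOf]
        simp only [hpre, if_true]
        have hdrop : List.drop (List.length [a]) (a :: t) = t := rfl
        rw [hdrop, ih t _ (by simp at h; omega)]
        simp
      · have hpre : List.isPrefixOf [c] (a :: t) = false := by
          simp [List.isPrefixOf]
          exact fun h => absurd h.symm hac
        simp only [hpre, Bool.false_eq_true, if_false]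
        rw [ih t _ (by simp at h; omega)]
        simp [hac]

theorem pv_replace_single (l : List Char) (c : Char) (r : List Char) :
    PySem.Chars.replace l [c] r = l.flatMap (fun x => if x = c then r else [x]) := by
  rw [PySem.Chars.replace]
  simp [pv_go1 c r l.length l [] (le_refl _)]

theorem pvCanon_replace2 (l : List Char) : pvCanon (pvReplace2 l) = pvCanon l := by
  induction l using pvReplace2.induct with
  | case1 => rfl
  | case2 a => rfl
  | case3 a b t hab ih =>
    obtain ⟨ha, hb⟩ := hab; subst ha; subst hb
    show pvCanon (' ' :: pvReplace2 t) = pvCanon (' ' :: ' ' :: t)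
    rw [pvCanon_cons, ih, ← pvCanon_cons]
    simp [pvCanon]
  | case4 a b t hab ih =>
    rw [show pvReplace2 (a :: b :: t) = a :: pvReplace2 (b :: t) from by
          simp only [pvReplace2]; rw [if_neg hab]]
    rw [pvCanon_cons, ih, ← pvCanon_cons]

-- the while loop computes the canonical form
theorem pvCollapseLoop_toList (s : String) : (pvCollapseLoop s).toList = pvCanon s.toList := by
  induction s using pvCollapseLoop.induct with
  | case1 s h ih =>
    rw [pvCollapseLoop, dif_pos h, ih, PySem.Str.toList_replace]
    show pvCanon (PySem.Chars.replace s.toList [' ', ' '] [' ']) = _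
    rw [pv_replace2_eq, pvCanon_replace2]
  | case2 s h =>
    rw [pvCollapseLoop, dif_neg h]
    have h2 : ¬ [' ', ' '] <:+: s.toList := by
      have : PySem.Str.isIn "  " s = false := by
        cases hb : PySem.Str.isIn "  " s
        · rfl
        · exact absurd hb h
      rw [PySem.Str.isIn] at this
      exact (PySem.Chars.isIn_eq_false_iff _ _).1 this
    have hdd : pvDD s.toList = false := by
      cases hb : pvDD s.toList
      · rfl
      · exact absurd ((pvDD_iff_infix _).1 hb) h2
    exact (pvCanon_of_dd_false _ hdd).symm

-- B's second loop computes the canonical form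
theorem pvFoldCollapse (s : List Char) : ∀ (acc : List Char),
    s.foldl (fun r ch => if ch = ' ' ∧ r ≠ [] ∧ r.getLast? = some ' ' then r else r ++ [ch]) acc =
      if acc.getLast? = some ' ' then acc ++ (pvCanon (' ' :: s)).tail else acc ++ pvCanon s := by
  induction s with
  | nil => intro acc; split_ifs <;> simp [pvCanon]
  | cons c cs ih =>
    intro acc
    simp only [List.foldl_cons]
    by_cases hacc : acc.getLast? = some ' '
    · have hne : acc ≠ [] := by intro hx; subst hx; simp at hacc
      by_cases hc : c = ' '
      · subst hc
        rw [if_pos ⟨rfl, hne, hacc⟩, ih acc, if_pos hacc, if_pos hacc,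
            show pvCanon (' ' :: ' ' :: cs) = pvCanon (' ' :: cs) from by simp [pvCanon]]
      · rw [if_neg (fun hx => hc hx.1), ih (acc ++ [c]),
            if_neg (by rw [List.getLast?_concat]; exact fun hx => hc (Option.some.inj hx)),
            if_pos hacc]
        rw [show pvCanon (' ' :: c :: cs) = ' ' :: pvCanon (c :: cs) by
              simp only [pvCanon]; rw [if_neg (fun hx => hc hx.2)],
            pvCanon_cons_of_ne c cs hc]
        simp
    · by_cases hc : c = ' '
      · subst hc
        rw [if_neg (fun hx => hacc hx.2.2), ih (acc ++ [' ']),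
            if_pos (List.getLast?_concat), if_neg hacc]
        obtain ⟨u, hu⟩ := pvCanon_cons_head ' ' cs
        simp [hu]
      · rw [if_neg (fun hx => hc hx.1), ih (acc ++ [c]),
            if_neg (by rw [List.getLast?_concat]; exact fun hx => hc (Option.some.inj hx)),
            if_neg hacc]
        rw [pvCanon_cons_of_ne c cs hc]
        simp

-- A's two replace loops, on the char-list side
theorem pvAFold (L : List Char) : ∀ (s : String),
    (L.foldl (fun s n => PySem.Str.replace s (String.ofList [n]) (String.ofList [' ', n, ' '])) s).toList
      = L.foldl (fun l n => l.flatMap (fun x => if x = n then [' ', n, ' '] else [x])) s.toList := by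
  induction L with
  | nil => intro s; rfl
  | cons c Lr ih =>
    intro s
    simp only [List.foldl_cons]
    rw [ih]
    congr 1
    rw [PySem.Str.toList_replace, String.toList_ofList, String.toList_ofList, pv_replace_single]

theorem pvCanon_three (c : Char) (hc : c ≠ ' ') : pvCanon [' ', c, ' '] = [' ', c, ' '] := by
  rw [show pvCanon [' ', c, ' '] = ' ' :: pvCanon [c, ' '] from by
        simp only [pvCanon]; rw [if_neg (fun h => hc h.2)]]
  rw [pvCanon_cons_of_ne c [' '] hc]
  rfl

theorem pvCanon_five (c : Char) (hc : c ≠ ' ') : pvCanon [' ', ' ', c, ' ', ' '] = [' ', c, ' '] := by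
  show pvCanon (' ' :: ' ' :: [c, ' ', ' ']) = _
  rw [show pvCanon (' ' :: ' ' :: [c, ' ', ' ']) = pvCanon (' ' :: [c, ' ', ' ']) from by
        simp [pvCanon]]
  rw [show pvCanon (' ' :: [c, ' ', ' ']) = ' ' :: pvCanon [c, ' ', ' '] from by
        simp only [pvCanon]; rw [if_neg (fun h => hc h.2)]]
  rw [pvCanon_cons_of_ne c [' ', ' '] hc]
  rfl

-- folding single-character expansions over a pad list is, up to pvCanon,
-- the one-pass expansion by membership in that list
theorem pvFoldExpand (L : List Char) (hL : ∀ c ∈ L, c ≠ ' ') : ∀ (s : List Char),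
    pvCanon (L.foldl (fun l n => l.flatMap (fun x => if x = n then [' ', n, ' '] else [x])) s)
      = pvCanon (s.flatMap (fun x => if x ∈ L then [' ', x, ' '] else [x])) := by
  induction L with
  | nil => intro s; simp
  | cons c Lr ih =>
    intro s
    have hc : c ≠ ' ' := hL c (by simp)
    have hLr : ∀ d ∈ Lr, d ≠ ' ' := fun d hd => hL d (by simp [hd])
    simp only [List.foldl_cons]
    rw [ih hLr, List.flatMap_assoc]
    apply pvCanon_flatMap_congr
    intro x
    by_cases hxc : x = c
    · subst hxc
      have hsp : ' ' ∉ Lr := fun h => (hLr ' ' h) rfl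
      rw [if_pos rfl, if_pos (by simp)]
      simp only [List.flatMap_cons, List.flatMap_nil, List.append_nil, if_neg hsp]
      by_cases hm : x ∈ Lr
      · rw [if_pos hm]
        show pvCanon [' ', ' ', x, ' ', ' '] = pvCanon [' ', x, ' ']
        rw [pvCanon_five x hc, pvCanon_three x hc]
      · rw [if_neg hm]; rfl
    · rw [if_neg hxc]
      simp only [List.flatMap_cons, List.flatMap_nil, List.append_nil]
      by_cases hm : x ∈ Lr
      · rw [if_pos hm, if_pos (List.mem_cons.2 (Or.inr hm))]
      · rw [if_neg hm, if_neg (by simp [hxc, hm])]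

-- pad characters: A's replace order, B's set
def pvPadL : List Char :=
  "0123456789".toList ++ ("!\"#$%&'()*+,-./:;<=>?@[\\]^_`{|}~".toList ++ ",.\\/:;–…".toList)

theorem pvPad_list_eq :
    ("0123456789!\"#$%&'()*+,-./:;<=>?@[\\]^_`{|}~,.\\/:;–…".toList) = pvPadL := by
  rw [pvPadL, ← String.toList_append, ← String.toList_append]
  congr 1

theorem pvPad_mem (x : Char) : (x ∈ pvPadB) ↔ x ∈ pvPadL := by
  unfold pvPadB
  rw [PySem.Set.mem_ofList, pvPad_list_eq]

theorem pvPad_no_space : ∀ c ∈ pvPadL, c ≠ ' ' := by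
  have h : (pvPadL.all (fun c => c != ' ')) = true := by decide
  intro c hc
  exact bne_iff_ne.mp (List.all_eq_true.mp h c hc)

theorem norm_text_key (line : String) : norm_text line = norm_text_alt line := by
  show PySem.Str.strip (pvCollapseLoop
      (("!\"#$%&'()*+,-./:;<=>?@[\\]^_`{|}~".toList ++ ",.\\/:;–…".toList).foldl
        (fun s p => PySem.Str.replace s (String.ofList [p]) (String.ofList [' ', p, ' ']))
        (("0123456789".toList).foldl
          (fun s n => PySem.Str.replace s (String.ofList [n]) (String.ofList [' ', n, ' '])) line)))
    = PySem.Str.strip (String.ofList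
      ((line.toList.foldl
          (fun acc ch => if ch ∈ pvPadB then acc ++ [' ', ch, ' '] else acc ++ [ch]) ([] : List Char)).foldl
        (fun r ch => if ch = ' ' ∧ r ≠ [] ∧ r.getLast? = some ' ' then r else r ++ [ch]) ([] : List Char)))
  rw [PySem.Str.strip, PySem.Str.strip]
  refine congrArg _ (congrArg _ ?_)
  rw [pvCollapseLoop_toList, String.toList_ofList]
  rw [pvFoldCollapse, if_neg (by simp), List.nil_append]
  rw [show (fun (acc : List Char) ch => if ch ∈ pvPadB then acc ++ [' ', ch, ' '] else acc ++ [ch])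
        = fun acc ch => acc ++ (if ch ∈ pvPadB then [' ', ch, ' '] else [ch]) from by
        funext acc ch; split_ifs <;> rfl]
  rw [PySem.List.foldl_append_eq_flatMap, List.nil_append]
  simp only [pvPad_mem]
  rw [pvAFold, pvAFold, ← List.foldl_append]
  simp only [String.toList_ofList]
  have hL : ((['0','1','2','3','4','5','6','7','8','9'] : List Char) ++
      ("!\"#$%&'()*+,-./:;<=>?@[\\]^_`{|}~".toList ++ ",.\\/:;–…".toList)) = pvPadL := by
    rw [pvPadL,
        show "0123456789".toList = (['0','1','2','3','4','5','6','7','8','9'] : List Char) from by decide]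
  rw [hL]
  exact pvFoldExpand pvPadL pvPad_no_space line.toList

-- ===== VERDICT (by name: the statement is the Claim_ definition above) =====
theorem norm_text_spec : Claim_equal_norm_text := by
  intro line _
  unfold Spec_norm_text
  exact norm_text_key line
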